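-- pv_equiv track=rewrite | github.com/DShanmukh/JAVA_CONCEPTS | Practice/Hina/iso.py | iso
-- ===== SOURCE A (Python) =====
-- def iso(n):
--   d={}
--   l=[]
--   for i in n:
--     if i not in d:
--       d[i]=1
--     else:
--       d[i]+=1
--     l.append(d[i])
--   return l
-- ===== SOURCE B (Python) =====
-- def iso(n):
--   seq = list(n)
--   out = [0] * len(seq)
--   for v in dict.fromkeys(seq):
--     r = 0
--     for i, x in enumerate(seq):
--       if x == v:
--         r += 1
--         out[i] = r
--   return out
-- ===== Notes on version B (the rewrite author's own statement) =====
-- stated objective: alternative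
-- what changed: Replaces A's single pass with a running dict of counts by a group-and-scatter scheme: preallocate the output, then for each distinct value (in first-occurrence order) make one pass writing that value's ranks 1,2,... into its positions.
import Mathlib
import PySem

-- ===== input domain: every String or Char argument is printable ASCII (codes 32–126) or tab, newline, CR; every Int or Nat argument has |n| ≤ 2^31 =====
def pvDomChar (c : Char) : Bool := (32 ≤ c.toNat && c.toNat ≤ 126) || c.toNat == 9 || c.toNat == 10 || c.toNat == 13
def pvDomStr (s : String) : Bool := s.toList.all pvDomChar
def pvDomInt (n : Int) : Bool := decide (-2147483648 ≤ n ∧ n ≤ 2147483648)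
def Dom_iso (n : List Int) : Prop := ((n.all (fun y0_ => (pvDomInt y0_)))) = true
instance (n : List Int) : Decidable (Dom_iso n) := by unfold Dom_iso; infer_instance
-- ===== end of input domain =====

-- B replaces A's single pass with a running dict by a group-and-scatter scheme: one pass per
-- distinct value writing that value's ranks 1,2,… into a preallocated output; alternative, not faster.

-- ===== PORT A =====
def iso (n : List Int) : List Int :=
  (n.foldl (fun (st : PySem.Dict Int Int × List Int) i =>
      let d := if st.1.contains i = false then st.1.insert i 1 else st.1.modify i 0 (· + 1)
      (d, st.2 ++ [d.getD i 0]))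
    (PySem.Dict.empty, [])).2

-- ===== PORT B =====
-- inner-loop body: 'if x == v: r += 1; out[i] = r'; the index i comes from enumerate, so it is
-- a nonnegative in-range index and Python's 'out[i] = r' is exactly List.set i.toNat
def passStep (v : Int) (st : Int × List Int) (q : Int × Int) : Int × List Int :=
  if q.2 = v then (st.1 + 1, st.2.set q.1.toNat (st.1 + 1)) else st

def iso_alt (n : List Int) : List Int :=
  (PySem.List.dedup n).foldl
    (fun out v => ((PySem.List.enumerate n 0).foldl (passStep v) (0, out)).2)
    (List.replicate n.length 0)

-- ===== PRECONDITION & SPEC =====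
def Spec_iso (n : List Int) (out : List Int) : Prop := out = iso_alt n
instance (n : List Int) (out : List Int) : Decidable (Spec_iso n out) := by unfold Spec_iso; infer_instance

-- ===== CLAIM (what is proved, stated in full; the proofs are below) =====
def Claim_equal_iso : Prop := ∀ (n : List Int), Dom_iso n → Spec_iso n (iso n)

-- ===== LEMMAS AND PROOFS =====

-- the running occurrence count at position j: count of n[j] within n[:j+1]
def pc (n : List Int) (j : Nat) : Int := ((n.take (j + 1)).count (n.getD j 0) : Int)

lemma getD_set (l : List Int) (i j : Nat) (a d : Int) :
    (l.set i a).getD j d = if i = j ∧ i < l.length then a else l.getD j d := by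
  simp only [List.getD, List.getElem?_set]
  by_cases h1 : i = j
  · subst h1
    by_cases h2 : i < l.length <;> simp [h2]
  · simp [h1]

-- intermediate form used to characterise A's loop: running counts over the prefix p
def isoGo (p t : List Int) : List Int :=
  match t with
  | [] => []
  | x :: t' => ((p.count x : Int) + 1) :: isoGo (p ++ [x]) t'

lemma iso_loop_eq_go (t : List Int) : ∀ (p l : List Int) (d : PySem.Dict Int Int),
    (∀ v, d.getD v 0 = (p.count v : Int)) →
    (t.foldl (fun (st : PySem.Dict Int Int × List Int) i =>
        let d := if st.1.contains i = false then st.1.insert i 1 else st.1.modify i 0 (· + 1)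
        (d, st.2 ++ [d.getD i 0])) (d, l)).2 = l ++ isoGo p t := by
  induction t with
  | nil => intro p l d _; simp [isoGo]
  | cons x t' ih =>
    intro p l d hd
    simp only [List.foldl_cons, isoGo]
    have hstep : ∀ v, (if d.contains x = false then d.insert x 1 else d.modify x 0 (· + 1)).getD v 0
        = ((p ++ [x]).count v : Int) := by
      intro v
      by_cases hc : d.contains x = false
      · rw [if_pos hc, PySem.Dict.getD_insert]
        have hx0 : d.getD x 0 = 0 := by simp [PySem.Dict.getD_of_not_contains, hc]
        have hpx : (p.count x : Int) = 0 := by rw [← hd x, hx0]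
        by_cases hv : v = x
        · subst hv
          simp [List.count_append]
          omega
        · rw [if_neg hv, hd v]
          simp [List.count_append, List.count_singleton]
          omega
      · rw [if_neg hc, PySem.Dict.getD_modify]
        by_cases hv : v = x
        · subst hv
          rw [if_pos rfl, hd v]
          simp [List.count_append]
        · rw [if_neg hv, hd v]
          simp [List.count_append, List.count_singleton]
          omega
    rw [ih (p ++ [x]) _ _ hstep]
    have hx : (if d.contains x = false then d.insert x 1 else d.modify x 0 (· + 1)).getD x 0
        = (p.count x : Int) + 1 := by
      rw [hstep x]; simp [List.count_append]
    rw [hx]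
    simp

lemma isoGo_length (t : List Int) : ∀ p, (isoGo p t).length = t.length := by
  induction t with
  | nil => intro p; simp [isoGo]
  | cons x t' ih => intro p; simp [isoGo, ih]

lemma isoGo_getD (t : List Int) : ∀ (p : List Int) (j : Nat), j < t.length →
    (isoGo p t).getD j 0 =
      (((p ++ t).take (p.length + j + 1)).count ((p ++ t).getD (p.length + j) 0) : Int) := by
  induction t with
  | nil => intro p j h; simp at h
  | cons x t' ih =>
    intro p j h
    cases j with
    | zero =>
      have htake : (p ++ x :: t').take (p.length + 1) = p ++ [x] := by
        simp [List.take_append]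
      have hval : (p ++ x :: t').getD p.length 0 = x := by
        rw [List.getD_eq_getElem _ _ (by simp), List.getElem_append_right (by omega)]
        simp
      simp only [isoGo, List.getD_cons_zero]
      rw [show p.length + 0 + 1 = p.length + 1 by omega, show p.length + 0 = p.length by omega,
        htake, hval]
      simp [List.count_append]
    | succ j' =>
      have h' : j' < t'.length := by simpa using h
      have := ih (p ++ [x]) j' h'
      simp only [isoGo, List.getD, List.getElem?_cons_succ]
      simp only [List.getD] at this
      rw [this]
      have hl : p ++ [x] ++ t' = p ++ x :: t' := by simp
      rw [hl]
      have h1 : (p ++ [x]).length + j' + 1 = p.length + (j' + 1) + 1 := by simp; omega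
      have h2 : (p ++ [x]).length + j' = p.length + (j' + 1) := by simp; omega
      rw [h1, h2]

-- one scatter pass for value v, over the suffix t of n = p ++ t, with r = count of v in p
lemma pass_spec (v : Int) (t : List Int) : ∀ (p out : List Int),
    out.length = p.length + t.length →
    (((PySem.List.enumerate t (p.length : Int)).foldl (passStep v)
        ((p.count v : Int), out)).2).length = out.length ∧
    (∀ j : Nat, (((PySem.List.enumerate t (p.length : Int)).foldl (passStep v)
        ((p.count v : Int), out)).2).getD j 0 =
      if p.length ≤ j ∧ j < out.length ∧ (p ++ t).getD j 0 = v
      then (((p ++ t).take (j + 1)).count v : Int) else out.getD j 0) := by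
  induction t with
  | nil =>
    intro p out hlen
    simp only [List.length_nil, Nat.add_zero] at hlen
    refine ⟨by simp [PySem.List.enumerate_nil], fun j => ?_⟩
    simp only [PySem.List.enumerate_nil, List.foldl_nil]
    split_ifs with h
    · obtain ⟨h1, h2, -⟩ := h; exfalso; omega
    · rfl
  | cons x t' ih =>
    intro p out hlen
    simp only [List.length_cons] at hlen
    rw [PySem.List.enumerate_cons, List.foldl_cons]
    have hplen : ((p.length : Int)).toNat = p.length := by simp
    have hval : (p ++ x :: t').getD p.length 0 = x := by
      rw [List.getD_eq_getElem _ _ (by simp), List.getElem_append_right (by omega)]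
      simp
    have htake : (p ++ x :: t').take (p.length + 1) = p ++ [x] := by
      simp [List.take_append]
    have hassoc : p ++ [x] ++ t' = p ++ x :: t' := by simp
    by_cases hx : x = v
    · -- the pass hits position p.length
      have hcnt : ((p ++ [x]).count v : Int) = (p.count v : Int) + 1 := by
        simp [List.count_append, hx]
      have hstep : passStep v ((p.count v : Int), out) ((p.length : Int), x)
          = ((((p ++ [x]).count v : Int)), out.set p.length ((p.count v : Int) + 1)) := by
        simp [passStep, hx, hplen]
      have hlen' : (out.set p.length ((p.count v : Int) + 1)).length
          = (p ++ [x]).length + t'.length := by simp; omega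
      have hint : ((p.length : Int)) + 1 = (((p ++ [x]).length : Nat) : Int) := by simp
      rw [hstep, hint]
      obtain ⟨ihlen, ihget⟩ := ih (p ++ [x]) (out.set p.length ((p.count v : Int) + 1)) hlen'
      refine ⟨by rw [ihlen]; simp, fun j => ?_⟩
      rw [ihget j, hassoc]
      rcases Nat.lt_trichotomy j p.length with hj | hj | hj
      · -- j < p.length
        rw [if_neg (show ¬((p ++ [x]).length ≤ j ∧
              j < (out.set p.length ((p.count v : Int) + 1)).length ∧
              (p ++ x :: t').getD j 0 = v) from by
            rintro ⟨h1, -, -⟩; simp only [List.length_append, List.length_cons,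
              List.length_nil] at h1; omega),
          if_neg (show ¬(p.length ≤ j ∧ j < out.length ∧ (p ++ x :: t').getD j 0 = v) from by
            rintro ⟨h1, -, -⟩; omega),
          getD_set,
          if_neg (show ¬(p.length = j ∧ p.length < out.length) from by omega)]
      · -- j = p.length
        have hout : j < out.length := by omega
        rw [if_neg (show ¬((p ++ [x]).length ≤ j ∧
              j < (out.set p.length ((p.count v : Int) + 1)).length ∧
              (p ++ x :: t').getD j 0 = v) from by
            rintro ⟨h1, -, -⟩; simp only [List.length_append, List.length_cons,
              List.length_nil] at h1; omega),
          getD_set,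
          if_pos (show p.length = j ∧ p.length < out.length from ⟨hj.symm, by omega⟩),
          if_pos (show p.length ≤ j ∧ j < out.length ∧ (p ++ x :: t').getD j 0 = v from
            ⟨by omega, hout, by rw [hj, hval, hx]⟩),
          show j + 1 = p.length + 1 from by omega, htake]
        exact hcnt.symm
      · -- j > p.length
        rw [getD_set, if_neg (show ¬(p.length = j ∧ p.length < out.length) from by omega)]
        by_cases hc : p.length ≤ j ∧ j < out.length ∧ (p ++ x :: t').getD j 0 = v
        · rw [if_pos (show (p ++ [x]).length ≤ j ∧
                j < (out.set p.length ((p.count v : Int) + 1)).length ∧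
                (p ++ x :: t').getD j 0 = v from by
              refine ⟨?_, ?_, hc.2.2⟩
              · simp only [List.length_append, List.length_cons, List.length_nil]; omega
              · simp only [List.length_set]; exact hc.2.1),
            if_pos hc]
        · rw [if_neg (show ¬((p ++ [x]).length ≤ j ∧
                j < (out.set p.length ((p.count v : Int) + 1)).length ∧
                (p ++ x :: t').getD j 0 = v) from by
              rintro ⟨h1, h2, h3⟩
              simp only [List.length_append, List.length_cons, List.length_nil] at h1
              simp only [List.length_set] at h2
              exact hc ⟨by omega, h2, h3⟩),
            if_neg hc]
    · -- x ≠ v : the output list is unchanged by this step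
      have hcnt2 : (p ++ [x]).count v = p.count v := by
        simp [List.count_append, hx]
      have hstep : passStep v ((p.count v : Int), out) ((p.length : Int), x)
          = ((((p ++ [x]).count v : Int)), out) := by
        simp [passStep, hx, hcnt2]
      have hlen' : out.length = (p ++ [x]).length + t'.length := by simp; omega
      have hint : ((p.length : Int)) + 1 = (((p ++ [x]).length : Nat) : Int) := by simp
      rw [hstep, hint]
      obtain ⟨ihlen, ihget⟩ := ih (p ++ [x]) out hlen'
      refine ⟨ihlen, fun j => ?_⟩
      rw [ihget j, hassoc]
      by_cases hj : j = p.length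
      · rw [if_neg (show ¬((p ++ [x]).length ≤ j ∧ j < out.length ∧
              (p ++ x :: t').getD j 0 = v) from by
            rintro ⟨h1, -, -⟩; simp only [List.length_append, List.length_cons,
              List.length_nil] at h1; omega),
          if_neg (show ¬(p.length ≤ j ∧ j < out.length ∧ (p ++ x :: t').getD j 0 = v) from by
            rintro ⟨-, -, h3⟩; rw [hj, hval] at h3; exact hx h3)]
      · by_cases hc : p.length ≤ j ∧ j < out.length ∧ (p ++ x :: t').getD j 0 = v
        · rw [if_pos (show (p ++ [x]).length ≤ j ∧ j < out.length ∧
                (p ++ x :: t').getD j 0 = v from by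
              refine ⟨?_, hc.2.1, hc.2.2⟩
              simp only [List.length_append, List.length_cons, List.length_nil]
              have := hc.1; omega),
            if_pos hc]
        · rw [if_neg (show ¬((p ++ [x]).length ≤ j ∧ j < out.length ∧
                (p ++ x :: t').getD j 0 = v) from by
              rintro ⟨h1, h2, h3⟩
              simp only [List.length_append, List.length_cons, List.length_nil] at h1
              exact hc ⟨by omega, h2, h3⟩),
            if_neg hc]

-- the outer loop over a list of values
lemma outer_spec (n : List Int) (vs : List Int) : ∀ (out : List Int), out.length = n.length →
    ((vs.foldl (fun out v => ((PySem.List.enumerate n 0).foldl (passStep v) (0, out)).2) out)).length = n.length ∧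
    ∀ j : Nat, j < n.length →
      ((vs.foldl (fun out v => ((PySem.List.enumerate n 0).foldl (passStep v) (0, out)).2) out)).getD j 0 =
        if n.getD j 0 ∈ vs then pc n j else out.getD j 0 := by
  induction vs with
  | nil => intro out hlen; exact ⟨hlen, fun j _ => by simp⟩
  | cons v vs' ih =>
    intro out hlen
    rw [List.foldl_cons]
    have hpass := pass_spec v n [] out (by simpa using hlen)
    have h0 : ((([] : List Int).length : Nat) : Int) = 0 := by simp
    have hr : ((([] : List Int).count v : Nat) : Int) = 0 := by simp
    rw [h0, hr] at hpass
    obtain ⟨plen, pget⟩ := hpass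
    obtain ⟨ilen, iget⟩ := ih _ (by rw [plen, hlen])
    refine ⟨ilen, fun j hj => ?_⟩
    rw [iget j hj, pget j]
    simp only [List.nil_append, List.length_nil, Nat.zero_le, true_and, List.mem_cons]
    by_cases hmem : n.getD j 0 ∈ vs'
    · rw [if_pos hmem, if_pos (Or.inr hmem)]
    · rw [if_neg hmem]
      by_cases hv : n.getD j 0 = v
      · rw [if_pos ⟨by omega, hv⟩, if_pos (Or.inl hv)]
        simp only [pc, hv]
      · rw [if_neg (by rintro ⟨-, h⟩; exact hv h), if_neg (by rintro (h | h) <;> [exact hv h; exact hmem h])]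

lemma iso_length (n : List Int) : (iso n).length = n.length := by
  unfold iso
  rw [iso_loop_eq_go n [] [] PySem.Dict.empty (by intro v; simp [PySem.Dict.getD_empty])]
  simp [isoGo_length]

lemma iso_getD (n : List Int) (j : Nat) (hj : j < n.length) : (iso n).getD j 0 = pc n j := by
  unfold iso
  rw [iso_loop_eq_go n [] [] PySem.Dict.empty (by intro v; simp [PySem.Dict.getD_empty])]
  have := isoGo_getD n [] j hj
  simpa [pc] using this

lemma iso_alt_length (n : List Int) : (iso_alt n).length = n.length := by
  unfold iso_alt
  exact (outer_spec n (PySem.List.dedup n) (List.replicate n.length 0) (by simp)).1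

lemma iso_alt_getD (n : List Int) (j : Nat) (hj : j < n.length) : (iso_alt n).getD j 0 = pc n j := by
  unfold iso_alt
  have h := (outer_spec n (PySem.List.dedup n) (List.replicate n.length 0) (by simp)).2 j hj
  rw [h]
  have hmem : n.getD j 0 ∈ PySem.List.dedup n := by
    rw [PySem.List.mem_dedup]
    rw [List.getD_eq_getElem n 0 hj]
    exact List.getElem_mem hj
  rw [if_pos hmem]

-- ===== VERDICT (by name: the statement is the Claim_ definition above) =====
theorem iso_spec : Claim_equal_iso := by
  intro n _
  unfold Spec_iso
  have hl : (iso n).length = (iso_alt n).length := by rw [iso_length, iso_alt_length]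
  apply List.ext_getElem hl
  intro j h1 h2
  have hj : j < n.length := by rw [iso_length] at h1; exact h1
  have := (iso_getD n j hj).trans (iso_alt_getD n j hj).symm
  rwa [List.getD_eq_getElem _ 0 h1, List.getD_eq_getElem _ 0 h2] at this
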